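-- pv_equiv track=rewrite | github.com/sabrodsky/ATCS | GoFish/Brodsky-human-gofish.py | check_tricks
-- ===== SOURCE A (Python) =====
-- def check_tricks(cur_player, hand_decks, player_tricks): #runs through player hand to see if there are any available tricks
-- 	card_freq = check_freq(hand_decks[cur_player])
-- 	for x in range(len(card_freq)):
-- 		if(card_freq[x][1] == 4): #needs to have four of the same values to be a trick
-- 			player_tricks[cur_player].append(card_freq[x][0]) #adds the value to the trick booklet
-- 			remove_card = card_freq[x][0]
-- 			for z in range(4):
-- 				hand_decks[cur_player].remove(remove_card) #removes all values from the trick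
-- 	return hand_decks, player_tricks
--
-- def check_freq(hand): #checks and returns frequencies within player hand
-- 	freqs = {}
-- 	for card in hand: #first makes a dictionary of card values and their frequencies
-- 		if card in freqs:
-- 			freqs[card] += 1
-- 		else:
-- 			freqs[card] = 1
-- 	freqs_list = []
-- 	for key in freqs: #puts into a list
-- 		freqs_list.append([key, freqs[key]])
-- 	return sorted(freqs_list)
-- ===== SOURCE B (Python) =====
-- def check_tricks(cur_player, hand_decks, player_tricks):
--     # B: sort a copy of the hand and scan it once for maximal runs; a run of
--     # length exactly 4 is a trick.  The hand is then rebuilt by one filter pass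
--     # instead of repeated list.remove calls.  Mutations (in-place update of
--     # hand_decks[cur_player] and player_tricks[cur_player]) match A's.
--     hand = hand_decks[cur_player]
--     s = sorted(hand)
--     quads = []
--     i = 0
--     n = len(s)
--     while i < n:
--         j = i + 1
--         while j < n and s[j] == s[i]:
--             j += 1
--         if j - i == 4:
--             quads.append(s[i])
--         i = j
--     qs = set(quads)
--     hand[:] = [c for c in hand if c not in qs]
--     if quads:
--         player_tricks[cur_player] += quads
--     return hand_decks, player_tricks
-- ===== Notes on version B (the rewrite author's own statement) =====
-- stated objective: alternative
-- what changed: Replaces the frequency-dictionary pass plus four repeated list.remove calls per trick with a single run-scan over a sorted copy of the hand (a maximal run of length exactly 4 is a trick) and one filter pass that rebuilds the hand.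
import Mathlib
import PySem

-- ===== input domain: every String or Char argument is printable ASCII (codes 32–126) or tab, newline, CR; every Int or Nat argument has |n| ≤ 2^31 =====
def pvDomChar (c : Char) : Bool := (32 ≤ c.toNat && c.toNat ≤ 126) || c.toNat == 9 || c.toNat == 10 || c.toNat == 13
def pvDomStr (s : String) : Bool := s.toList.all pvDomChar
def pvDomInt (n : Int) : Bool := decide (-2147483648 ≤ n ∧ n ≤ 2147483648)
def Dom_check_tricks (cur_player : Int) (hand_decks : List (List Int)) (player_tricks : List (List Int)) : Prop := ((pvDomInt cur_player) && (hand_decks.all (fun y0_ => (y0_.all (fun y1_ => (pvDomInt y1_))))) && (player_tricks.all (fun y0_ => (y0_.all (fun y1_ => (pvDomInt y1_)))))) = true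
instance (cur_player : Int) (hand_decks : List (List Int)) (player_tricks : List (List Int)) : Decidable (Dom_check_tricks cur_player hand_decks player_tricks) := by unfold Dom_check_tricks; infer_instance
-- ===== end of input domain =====

-- B replaces A's frequency dictionary + repeated list.remove with a single run-scan of a
-- sorted copy of the hand and one filter pass; both mutate hand_decks[cur_player] and
-- player_tricks[cur_player] in place identically (equivalence proved on the return value).

-- ===== PORT A =====
def check_freq (hand : List Int) : List (Int × Int) :=
  let freqs := hand.foldl
    (fun d card =>
      if PySem.Dict.contains d card then d.insert card (d.getD card 0 + 1)  -- freqs[card] += 1 (key present, so freqs[card] = getD card 0)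
      else d.insert card 1) PySem.Dict.empty
  let freqs_list := (PySem.Dict.keys freqs).foldl
    (fun acc key => acc ++ [(key, freqs.getD key 0)]) []                    -- freqs[key]: key ∈ keys, so getD is exact
  PySem.List.sorted2 freqs_list (fun p => p.1) (fun p => p.2) false          -- sorted(): lexicographic on the [key, count] pairs

def check_tricks (cur_player : Int) (hand_decks : List (List Int)) (player_tricks : List (List Int)) : List (List Int) × List (List Int) :=
  match PySem.List.pyGet? hand_decks cur_player with
  | none => (hand_decks, player_tricks)   -- IndexError (excluded by Pre_)
  | some hand =>
    let card_freq := check_freq hand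
    -- the loop mutates player_tricks[cur_player] (appends) and hand_decks[cur_player]
    -- (removes); we thread (appended tricks, current hand) and write both back at the end
    let st := card_freq.foldl
      (fun (st : List Int × List Int) p =>
        if p.2 == 4 then
          (st.1 ++ [p.1],
           -- for z in range(4): hand.remove(p.1)  — ValueError unreachable: count is 4
           (PySem.List.pyRange 0 4 1).foldl (fun h _ => (PySem.List.remove? h p.1).getD h) st.2)
        else st) ([], hand)
    (PySem.List.pySetD hand_decks cur_player st.2,
     -- player_tricks[cur_player] is only accessed when some trick was found;
     -- if it is out of range then, Python raises IndexError (excluded by Pre_)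
     if st.1.isEmpty then player_tricks
     else PySem.List.pySetD player_tricks cur_player (PySem.List.pyGetD player_tricks cur_player [] ++ st.1))

-- ===== PORT B =====
-- the run-scan over the sorted copy: a maximal run of equal cards of length exactly 4 is a trick
def runScan : List Int → List Int
  | [] => []
  | c :: rest =>
    let run := rest.takeWhile (fun x => x == c)
    let rest' := rest.dropWhile (fun x => x == c)
    if run.length + 1 = 4 then c :: runScan rest' else runScan rest'
termination_by s => s.length
decreasing_by
  all_goals
    have h := List.length_dropWhile_le (fun x => x == c) rest
    simp only [List.length_cons]
    omega

def check_tricks_alt (cur_player : Int) (hand_decks : List (List Int)) (player_tricks : List (List Int)) : List (List Int) × List (List Int) :=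
  match PySem.List.pyGet? hand_decks cur_player with
  | none => (hand_decks, player_tricks)   -- IndexError (excluded by Pre_)
  | some hand =>
    let s := PySem.List.sorted hand (fun x => x) false
    let quads := runScan s
    let qs := PySem.Set.ofList quads
    (PySem.List.pySetD hand_decks cur_player (hand.filter (fun c => !(PySem.Set.contains qs c))),
     if quads.isEmpty then player_tricks
     else PySem.List.pySetD player_tricks cur_player (PySem.List.pyGetD player_tricks cur_player [] ++ quads))

-- ===== PRECONDITION & SPEC =====
-- Pre_ excludes exactly the inputs where A raises IndexError: cur_player out of range of
-- hand_decks, or out of range of player_tricks while the hand holds a four-of-a-kind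
-- (only then does A index player_tricks).
def Pre_check_tricks (cur_player : Int) (hand_decks : List (List Int)) (player_tricks : List (List Int)) : Prop :=
  PySem.Raise.InRange hand_decks.length cur_player ∧
  ((∃ c ∈ (PySem.List.pyGet? hand_decks cur_player).getD [], ((PySem.List.pyGet? hand_decks cur_player).getD []).count c = 4) →
    PySem.Raise.InRange player_tricks.length cur_player)
instance (cur_player : Int) (hand_decks : List (List Int)) (player_tricks : List (List Int)) : Decidable (Pre_check_tricks cur_player hand_decks player_tricks) := by unfold Pre_check_tricks; infer_instance

def pvWitness_check_tricks : Int × List (List Int) × List (List Int) := (0, [[1, 1, 2, 1, 1]], [[]])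

def Spec_check_tricks (cur_player : Int) (hand_decks : List (List Int)) (player_tricks : List (List Int)) (out : List (List Int) × List (List Int)) : Prop := out = check_tricks_alt cur_player hand_decks player_tricks
instance (cur_player : Int) (hand_decks : List (List Int)) (player_tricks : List (List Int)) (out : List (List Int) × List (List Int)) : Decidable (Spec_check_tricks cur_player hand_decks player_tricks out) := by unfold Spec_check_tricks; infer_instance

-- ===== CLAIM (what is proved, stated in full; the proofs are below) =====
def Claim_equal_check_tricks : Prop := ∀ (cur_player : Int) (hand_decks : List (List Int)) (player_tricks : List (List Int)), Dom_check_tricks cur_player hand_decks player_tricks → Pre_check_tricks cur_player hand_decks player_tricks → Spec_check_tricks cur_player hand_decks player_tricks (check_tricks cur_player hand_decks player_tricks)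

-- ===== LEMMAS AND PROOFS =====

-- ---- the frequency dictionary is a counter ----
lemma freq_dict_eq (hand : List Int) :
    hand.foldl (fun d card => if PySem.Dict.contains d card then d.insert card (d.getD card 0 + 1)
      else d.insert card 1) PySem.Dict.empty = PySem.Dict.counter hand := by
  rw [← PySem.Dict.foldl_insert_getD_add_one_eq_counter]
  apply PySem.List.foldl_congr_mem
  intro d card _
  by_cases h : PySem.Dict.contains d card
  · simp [h]
  · have hfalse : PySem.Dict.contains d card = false := by simpa using h
    have hg : d.get? card = none := by
      have hc := PySem.Dict.contains_eq_isSome_get? d card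
      rw [hfalse] at hc
      exact Option.not_isSome_iff_eq_none.mp (by simp [← hc])
    simp [hfalse, PySem.Dict.getD, hg]

-- ---- sorted2 on pairs with distinct first components is sort-by-first ----
lemma insertBy_congr_mem {α : Type} (b1 b2 : α → α → Bool) (x : α) :
    ∀ (acc : List α), (∀ y ∈ acc, b1 x y = b2 x y) →
      PySem.List.insertBy b1 x acc = PySem.List.insertBy b2 x acc := by
  intro acc
  induction acc with
  | nil => intro _; simp [PySem.List.insertBy]
  | cons y ys ih =>
    intro h
    have hy := h y (by simp)
    simp only [PySem.List.insertBy, hy]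
    rw [ih (fun z hz => h z (by simp [hz]))]

lemma foldl_insertBy_congr {α : Type} (S : List α) (b1 b2 : α → α → Bool)
    (hb : ∀ a ∈ S, ∀ c ∈ S, a ≠ c → b1 a c = b2 a c) :
    ∀ (l acc : List α), l.Nodup → (∀ x ∈ l, x ∈ S) → (∀ y ∈ acc, y ∈ S) → (∀ x ∈ l, x ∉ acc) →
      l.foldl (fun acc x => PySem.List.insertBy b1 x acc) acc
        = l.foldl (fun acc x => PySem.List.insertBy b2 x acc) acc := by
  intro l
  induction l with
  | nil => intros; rfl
  | cons x l ih =>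
    intro acc hnd hlS haccS hdisj
    simp only [List.foldl_cons]
    rw [insertBy_congr_mem b1 b2 x acc (fun y hy => hb x (hlS x (by simp)) y (haccS y hy)
      (by intro he; exact hdisj x (by simp) (he ▸ hy)))]
    apply ih (PySem.List.insertBy b2 x acc) hnd.of_cons (fun z hz => hlS z (by simp [hz]))
    · intro y hy
      rcases (PySem.List.mem_insertBy b2 x y acc).mp hy with h | h
      · exact h ▸ hlS x (by simp)
      · exact haccS y h
    · intro z hz hmem
      rcases (PySem.List.mem_insertBy b2 x z acc).mp hmem with h | h
      · exact (List.nodup_cons.mp hnd).1 (h ▸ hz)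
      · exact hdisj z (by simp [hz]) h

lemma sorted2_eq_sorted_fst (fl : List (Int × Int)) (hnd : (fl.map Prod.fst).Nodup) :
    PySem.List.sorted2 fl (fun p => p.1) (fun p => p.2) false
      = PySem.List.sorted fl (fun p => p.1) false := by
  rw [PySem.List.sorted_eq_foldl_insertBy]
  show fl.foldl (fun acc x => PySem.List.insertBy
      (fun a b => decide (a.1 < b.1) || (!decide (b.1 < a.1) && decide (a.2 < b.2))) x acc) [] = _
  apply foldl_insertBy_congr fl _ _ _ fl [] (hnd.of_map) (fun x hx => hx) (by simp) (by simp)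
  intro a ha c hc hne
  have hfst : a.1 ≠ c.1 := fun he => hne (List.inj_on_of_nodup_map hnd ha hc he)
  rcases lt_trichotomy a.1 c.1 with h | h | h
  · simp [h, not_lt_of_gt h]
  · exact absurd h hfst
  · simp [not_lt_of_gt h, h]

-- ---- check_freq computes the sorted distinct values with their multiplicities ----
lemma check_freq_eq (hand : List Int) :
    check_freq hand = (PySem.List.sorted (PySem.Set.ofList hand) (fun x => x) false).map
      (fun k => (k, (hand.count k : Int))) := by
  have hfl : (PySem.Set.ofList hand).foldl
      (fun acc key => acc ++ [(key, (PySem.Dict.counter hand).getD key 0)]) []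
      = (PySem.Set.ofList hand).map (fun k => (k, (hand.count k : Int))) := by
    rw [PySem.List.foldl_append_singleton_eq_map, List.nil_append]
    apply List.map_congr_left
    intro k _
    rw [PySem.Dict.getD_counter]
  have hnd : (((PySem.Set.ofList hand).map (fun k => (k, (hand.count k : Int)))).map Prod.fst).Nodup := by
    rw [List.map_map]
    have : (Prod.fst ∘ fun k => (k, (hand.count k : Int))) = id := by funext k; rfl
    rw [this, List.map_id]
    exact PySem.Set.nodup_ofList hand
  unfold check_freq
  simp only [freq_dict_eq, PySem.Dict.keys_counter]
  rw [hfl, sorted2_eq_sorted_fst _ hnd]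
  apply PySem.List.sorted_eq_of_perm_of_pairwise_lt
  · exact ((PySem.List.sorted_perm (PySem.Set.ofList hand) (fun x => x) false).map _)
  · rw [List.pairwise_map]
    exact PySem.List.sorted_ofList_pairwise_lt hand

-- ---- removing n = count occurrences is a filter ----
def remN : Nat → List Int → Int → List Int
  | 0, h, _ => h
  | n+1, h, k => remN n ((PySem.List.remove? h k).getD h) k

lemma remN_cons_ne (a k : Int) (hne : a ≠ k) :
    ∀ (n : Nat) (t : List Int), remN n (a :: t) k = a :: remN n t k := by
  intro n
  induction n with
  | zero => intro t; rfl
  | succ n ih =>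
    intro t
    simp only [remN, PySem.List.remove?_cons_of_ne t hne]
    cases h : PySem.List.remove? t k with
    | none => simp [ih]
    | some t' => simp [ih]

lemma remN_count (k : Int) : ∀ (h : List Int), remN (h.count k) h k = h.filter (fun c => !(c == k)) := by
  intro h
  induction h with
  | nil => rfl
  | cons a t ih =>
    by_cases hak : a = k
    · subst hak
      rw [List.count_cons_self]
      simp only [remN, PySem.List.remove?_cons_self, Option.getD_some]
      simp [ih]
    · rw [List.count_cons_of_ne (by exact fun he => hak he)]
      rw [remN_cons_ne a k hak]
      simp [ih, hak]

lemma pyRange4 : PySem.List.pyRange 0 4 1 = [0, 1, 2, 3] := by decide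

lemma rem4_eq_remN (h : List Int) (k : Int) :
    (PySem.List.pyRange 0 4 1).foldl (fun h _ => (PySem.List.remove? h k).getD h) h = remN 4 h k := by
  rw [pyRange4]; rfl

-- ---- the removal loop over distinct keys is one filter ----
lemma foldl_remove_filter (c4 : Int → Bool) :
    ∀ (K : List Int) (h : List Int), K.Nodup → (∀ k ∈ K, (c4 k = true ↔ h.count k = 4)) →
      K.foldl (fun h k => if c4 k then remN 4 h k else h) h
        = h.filter (fun c => !(decide (c ∈ K) && c4 c)) := by
  intro K
  induction K with
  | nil => intro h _ _; simp
  | cons k K ih =>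
    intro h hnd hcnt
    have hknotin : k ∉ K := (List.nodup_cons.mp hnd).1
    simp only [List.foldl_cons]
    by_cases hc : c4 k
    · have hck : h.count k = 4 := (hcnt k (by simp)).mp hc
      have hrem : remN 4 h k = h.filter (fun c => !(c == k)) := by
        rw [← hck]; exact remN_count k h
      rw [if_pos hc, hrem]
      rw [ih (h.filter (fun c => !(c == k))) (List.nodup_cons.mp hnd).2 ?hcounts]
      case hcounts =>
        intro k' hk'
        have hne : k' ≠ k := fun he => hknotin (he ▸ hk')
        rw [List.count_filter (by simp [hne])]
        exact hcnt k' (by simp [hk'])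
      rw [List.filter_filter]
      apply List.filter_congr
      intro c _
      by_cases hck' : c = k
      · subst hck'; simp [hc]
      · simp [hck']
    · rw [if_neg hc, ih h (List.nodup_cons.mp hnd).2 (fun k' hk' => hcnt k' (by simp [hk']))]
      apply List.filter_congr
      intro c _
      by_cases hck' : c = k
      · subst hck'; simp [hc]
      · simp [hck']

-- ---- splitting the paired fold of A's main loop ----
lemma foldl_pair_if {X A B : Type} (p : X → Bool) (f : A → X → A) (g : B → X → B) :
    ∀ (l : List X) (a : A) (b : B),
      l.foldl (fun st x => if p x then (f st.1 x, g st.2 x) else st) (a, b)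
        = (l.foldl (fun t x => if p x then f t x else t) a,
           l.foldl (fun h x => if p x then g h x else h) b) := by
  intro l
  induction l with
  | nil => intros; rfl
  | cons x l ih =>
    intro a b
    simp only [List.foldl_cons]
    by_cases hp : p x
    · simp only [hp, if_true]; exact ih (f a x) (g b x)
    · simp only [hp]; exact ih a b

-- ---- runScan: membership and strict sortedness ----
lemma dropWhile_head_false {α : Type} (p : α → Bool) :
    ∀ (l : List α) (h : α) (t : List α), l.dropWhile p = h :: t → p h = false := by
  intro l
  induction l with
  | nil => intro h t he; simp [List.dropWhile] at he
  | cons a l ih =>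
    intro h t he
    by_cases hp : p a
    · rw [List.dropWhile_cons_of_pos hp] at he; exact ih h t he
    · rw [List.dropWhile_cons_of_neg hp] at he
      cases he; simpa using hp

lemma runScan_nil : runScan [] = [] := by rw [runScan]

lemma runScan_cons (c : Int) (rest : List Int) :
    runScan (c :: rest)
      = if (rest.takeWhile (fun x => x == c)).length + 1 = 4
        then c :: runScan (rest.dropWhile (fun x => x == c))
        else runScan (rest.dropWhile (fun x => x == c)) := by
  rw [runScan]

lemma runScan_spec : ∀ (s : List Int), s.Pairwise (· ≤ ·) →
    (∀ c : Int, (c ∈ runScan s ↔ s.count c = 4)) ∧ (runScan s).Pairwise (· < ·) := by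
  suffices H : ∀ (n : Nat) (s : List Int), s.length ≤ n → s.Pairwise (· ≤ ·) →
      (∀ c : Int, (c ∈ runScan s ↔ s.count c = 4)) ∧ (runScan s).Pairwise (· < ·) by
    intro s hs; exact H s.length s le_rfl hs
  intro n
  induction n with
  | zero =>
    intro s hlen _
    have hnil : s = [] := List.length_eq_zero_iff.mp (Nat.le_zero.mp hlen)
    subst hnil
    simp [runScan_nil]
  | succ n ih =>
    intro s hlen hs
    cases s with
    | nil => simp [runScan_nil]
    | cons c rest =>
      have hlenrest : rest.length ≤ n := by simpa using hlen
      have hlen' : (rest.dropWhile (fun x => x == c)).length ≤ n :=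
        le_trans (List.length_dropWhile_le _ _) hlenrest
      have hge : ∀ x ∈ rest, c ≤ x := (List.pairwise_cons.mp hs).1
      have hPairRest : rest.Pairwise (· ≤ ·) := (List.pairwise_cons.mp hs).2
      have hrest'sorted : (rest.dropWhile (fun x => x == c)).Pairwise (· ≤ ·) :=
        List.Pairwise.sublist (List.dropWhile_sublist _) hPairRest
      obtain ⟨hmemIH, hpwIH⟩ := ih _ hlen' hrest'sorted
      have hgt : ∀ x ∈ rest.dropWhile (fun x => x == c), c < x := by
        cases hr : rest.dropWhile (fun x => x == c) with
        | nil => simp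
        | cons hh t =>
          have hhne : hh ≠ c := by
            have := dropWhile_head_false (fun x => x == c) rest hh t hr
            simpa using this
          have hhmem : hh ∈ rest := (List.dropWhile_sublist _).subset (by rw [hr]; simp)
          have hch : c < hh := lt_of_le_of_ne (hge hh hhmem) (Ne.symm hhne)
          intro x hx
          rcases List.mem_cons.mp hx with rfl | hxt
          · exact hch
          · exact lt_of_lt_of_le hch ((List.pairwise_cons.mp (hr ▸ hrest'sorted)).1 x hxt)
      have hruncnt : (rest.takeWhile (fun x => x == c)).count c
          = (rest.takeWhile (fun x => x == c)).length := by
        rw [List.count_eq_length]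
        intro b hb
        have hb' : b = c := by simpa using List.mem_takeWhile_imp hb
        exact hb'.symm
      have hrest'0 : (rest.dropWhile (fun x => x == c)).count c = 0 :=
        List.count_eq_zero.mpr (fun hmem => lt_irrefl c (hgt c hmem))
      have hcount_c : (c :: rest).count c = (rest.takeWhile (fun x => x == c)).length + 1 := by
        rw [List.count_cons_self]
        conv_lhs => rw [← List.takeWhile_append_dropWhile (p := fun x => x == c) (l := rest)]
        rw [List.count_append, hruncnt, hrest'0]
      have hcount_ne : ∀ d : Int, d ≠ c →
          (c :: rest).count d = (rest.dropWhile (fun x => x == c)).count d := by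
        intro d hd
        rw [List.count_cons_of_ne hd.symm]
        conv_lhs => rw [← List.takeWhile_append_dropWhile (p := fun x => x == c) (l := rest)]
        rw [List.count_append]
        have h0 : (rest.takeWhile (fun x => x == c)).count d = 0 :=
          List.count_eq_zero.mpr
            (fun hmem => hd (by simpa using List.mem_takeWhile_imp hmem))
        omega
      constructor
      · intro d
        by_cases hdc : d = c
        · subst hdc
          rw [runScan_cons, hcount_c]
          by_cases h4 : (rest.takeWhile (fun x => x == d)).length + 1 = 4
          · simp [h4]
          · simp [h4, hmemIH d, hrest'0]
        · rw [runScan_cons, hcount_ne d hdc, ← hmemIH d]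
          by_cases h4 : (rest.takeWhile (fun x => x == c)).length + 1 = 4 <;>
            simp [h4, hdc]
      · rw [runScan_cons]
        by_cases h4 : (rest.takeWhile (fun x => x == c)).length + 1 = 4
        · rw [if_pos h4]
          refine List.pairwise_cons.mpr ⟨?_, hpwIH⟩
          intro x hx
          have hc4 : (rest.dropWhile (fun x => x == c)).count x = 4 := (hmemIH x).mp hx
          exact hgt x (List.count_pos_iff.mp (by omega))
        · rw [if_neg h4]; exact hpwIH

-- ---- the two quad lists agree ----
lemma sorted_id_pairwise (hand : List Int) :
    (PySem.List.sorted hand (fun x => x) false).Pairwise (· ≤ ·) := by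
  exact PySem.List.sorted_pairwise hand (fun x => x)

lemma mem_quads (hand : List Int) (c : Int) :
    c ∈ runScan (PySem.List.sorted hand (fun x => x) false) ↔ hand.count c = 4 := by
  rw [(runScan_spec _ (sorted_id_pairwise hand)).1 c]
  rw [(PySem.List.sorted_perm hand (fun x => x) false).count_eq]

lemma quads_eq (hand : List Int) :
    runScan (PySem.List.sorted hand (fun x => x) false)
      = (PySem.List.sorted (PySem.Set.ofList hand) (fun x => x) false).filter
          (fun k => ((hand.count k : Int) == 4)) := by
  have hKlt := PySem.List.sorted_ofList_pairwise_lt hand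
  have hpw := (runScan_spec _ (sorted_id_pairwise hand)).2
  apply PySem.List.eq_of_perm_of_pairwise_le_of_injective (fun x : Int => x) Function.injective_id
  · rw [List.perm_ext_iff_of_nodup (hpw.imp ne_of_lt)
      ((List.Pairwise.sublist List.filter_sublist hKlt).imp ne_of_lt)]
    intro a
    rw [mem_quads, List.mem_filter, PySem.List.mem_sorted, PySem.Set.mem_ofList]
    constructor
    · intro h
      refine ⟨List.count_pos_iff.mp (by omega), by simp [h]⟩
    · rintro ⟨_, hb⟩
      simp only [beq_iff_eq] at hb
      omega
  · exact hpw.imp le_of_lt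
  · exact ((List.Pairwise.sublist List.filter_sublist hKlt).imp le_of_lt)

-- ---- A's main loop computed in closed form ----
lemma st_eq (hand : List Int) :
    (check_freq hand).foldl
      (fun (st : List Int × List Int) p =>
        if p.2 == 4 then
          (st.1 ++ [p.1],
           (PySem.List.pyRange 0 4 1).foldl (fun h _ => (PySem.List.remove? h p.1).getD h) st.2)
        else st) ([], hand)
      = ((PySem.List.sorted (PySem.Set.ofList hand) (fun x => x) false).filter
           (fun k => ((hand.count k : Int) == 4)),
         hand.filter (fun c => !((hand.count c : Int) == 4))) := by
  have hKlt := PySem.List.sorted_ofList_pairwise_lt hand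
  rw [check_freq_eq hand, List.foldl_map]
  rw [show (fun (st : List Int × List Int) (k : Int) =>
        if ((k, (hand.count k : Int)).2 == 4) then
          ((st.1 ++ [(k, (hand.count k : Int)).1]),
           (PySem.List.pyRange 0 4 1).foldl (fun h _ => (PySem.List.remove? h (k, (hand.count k : Int)).1).getD h) st.2)
        else st)
      = (fun (st : List Int × List Int) (k : Int) =>
        if ((hand.count k : Int) == 4) then
          (st.1 ++ [k],
           (PySem.List.pyRange 0 4 1).foldl (fun h _ => (PySem.List.remove? h k).getD h) st.2)
        else st) from rfl]
  rw [foldl_pair_if (fun k : Int => ((hand.count k : Int) == 4)) (fun t k => t ++ [k])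
    (fun h k => (PySem.List.pyRange 0 4 1).foldl (fun h _ => (PySem.List.remove? h k).getD h) h)]
  simp only [Prod.mk.injEq]
  constructor
  · rw [PySem.List.foldl_append_if_eq_filter (fun k : Int => ((hand.count k : Int) == 4)), List.nil_append]
  · have hcong : ∀ (acc : List Int), ∀ k ∈ PySem.List.sorted (PySem.Set.ofList hand) (fun x => x) false,
        (fun h k => if ((hand.count k : Int) == 4) then
          (PySem.List.pyRange 0 4 1).foldl (fun h _ => (PySem.List.remove? h k).getD h) h else h) acc k
        = (fun h k => if ((hand.count k : Int) == 4) then remN 4 h k else h) acc k := by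
      intro acc k _
      by_cases hc : ((hand.count k : Int) == 4) <;> simp [hc, rem4_eq_remN]
    rw [PySem.List.foldl_congr_mem _ _ _ _ hcong]
    have hcnt : ∀ k ∈ PySem.List.sorted (PySem.Set.ofList hand) (fun x => x) false,
        (((hand.count k : Int) == 4) = true ↔ hand.count k = 4) := by
      intro k _
      simp only [beq_iff_eq]
      omega
    rw [foldl_remove_filter _ _ _ (hKlt.imp ne_of_lt) hcnt]
    apply List.filter_congr
    intro c hc
    have hmem : c ∈ PySem.List.sorted (PySem.Set.ofList hand) (fun x => x) false := by
      rw [PySem.List.mem_sorted, PySem.Set.mem_ofList]; exact hc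
    simp [hmem]

-- ===== VERDICT (by name: the statement is the Claim_ definition above) =====
theorem check_tricks_spec : Claim_equal_check_tricks := by
  intro cur_player hand_decks player_tricks _ _
  unfold Spec_check_tricks check_tricks check_tricks_alt
  cases hget : PySem.List.pyGet? hand_decks cur_player with
  | none => rfl
  | some hand =>
    have hfilter : hand.filter
        (fun c => !(PySem.Set.contains
          (PySem.Set.ofList (runScan (PySem.List.sorted hand (fun x => x) false))) c))
        = hand.filter (fun c => !((hand.count c : Int) == 4)) := by
      apply List.filter_congr
      intro c _
      have hb : PySem.Set.contains
          (PySem.Set.ofList (runScan (PySem.List.sorted hand (fun x => x) false))) c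
          = ((hand.count c : Int) == 4) := by
        rw [Bool.eq_iff_iff]
        simp only [PySem.Set.contains, List.contains_iff_mem, PySem.Set.mem_ofList,
          mem_quads, beq_iff_eq]
        omega
      rw [hb]
    simp only [st_eq hand]
    rw [hfilter, quads_eq hand]
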